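-- pv_equiv track=rewrite | github.com/seali-rgb/Neural-Network-Accelerator | compile/compile_utils.py | count_equal_a_b
-- ===== SOURCE A (Python) =====
-- def count_equal_a_b(x, stride):
--     a, b = 0, 64  # 初始化 a 和 b
--     output = 0  # 计数器
--     for _ in range(x + 2):
--         if a == int(b // 32):  # 当 a 和 b 的整数部分相等时
--             output += 1
--             b += stride
--         a += 1
--
--     return output
-- ===== SOURCE B (Python) =====
-- def count_equal_a_b(x, stride):
--     # Closed form: matches occur at a = (64 + m*stride)//32 for m = 0,1,...,
--     # strictly increasing iff stride >= 32; otherwise the loop stalls after the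
--     # first match.  O(1) instead of O(x).
--     if x <= 0:
--         return 0
--     if stride < 32:
--         return 1
--     return (32 * x - 1) // stride + 1
-- ===== Notes on version B (the rewrite author's own statement) =====
-- stated objective: faster
-- what changed: Replaced A's O(x) simulation loop with an O(1) closed form: matches occur at a = (64+m*stride)//32, which is strictly increasing iff stride >= 32 (giving (32x-1)//stride + 1 matches) and stalls after the first match otherwise.
import Mathlib
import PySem

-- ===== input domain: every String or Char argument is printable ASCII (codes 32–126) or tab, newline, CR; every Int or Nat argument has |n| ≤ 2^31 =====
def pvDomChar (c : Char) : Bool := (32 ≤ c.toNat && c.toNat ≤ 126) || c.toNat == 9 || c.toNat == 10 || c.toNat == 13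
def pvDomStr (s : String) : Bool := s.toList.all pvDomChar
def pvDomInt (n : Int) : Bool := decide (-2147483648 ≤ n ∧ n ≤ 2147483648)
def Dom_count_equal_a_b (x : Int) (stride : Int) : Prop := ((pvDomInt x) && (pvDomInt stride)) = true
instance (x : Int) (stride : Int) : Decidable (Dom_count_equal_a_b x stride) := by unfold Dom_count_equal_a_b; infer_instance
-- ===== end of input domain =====

-- B replaces A's O(x) counting loop with a closed form (O(1)): matches happen at
-- a = (64 + m*stride)//32, strictly increasing iff stride ≥ 32, stalling after the
-- first match otherwise.

-- ===== PORT A =====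
-- the for-loop of A: fuel = number of remaining iterations, state (a, b, output)
def countLoopA (stride : Int) : Nat → Int → Int → Int → Int
  | 0, _, _, output => output
  | n + 1, a, b, output =>
    if a = PySem.Int.floordiv b 32 then
      countLoopA stride n (a + 1) (b + stride) (output + 1)
    else
      countLoopA stride n (a + 1) b output

def count_equal_a_b (x : Int) (stride : Int) : Int :=
  countLoopA stride (x + 2).toNat 0 64 0

-- ===== PORT B =====
def count_equal_a_b_alt (x : Int) (stride : Int) : Int :=
  if x ≤ 0 then 0
  else if stride < 32 then 1
  else PySem.Int.floordiv (32 * x - 1) stride + 1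

-- ===== PRECONDITION & SPEC =====
def Spec_count_equal_a_b (x : Int) (stride : Int) (out : Int) : Prop := out = count_equal_a_b_alt x stride
instance (x : Int) (stride : Int) (out : Int) : Decidable (Spec_count_equal_a_b x stride out) := by unfold Spec_count_equal_a_b; infer_instance

-- ===== CLAIM (what is proved, stated in full; the proofs are below) =====
def Claim_equal_count_equal_a_b : Prop := ∀ (x : Int) (stride : Int), Dom_count_equal_a_b x stride → Spec_count_equal_a_b x stride (count_equal_a_b x stride)

-- ===== LEMMAS AND PROOFS =====

-- Once a has passed the current target b//32, no further match ever fires.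
theorem countLoopA_stall (stride : Int) (n : Nat) :
    ∀ (a b output : Int), PySem.Int.floordiv b 32 < a →
      countLoopA stride n a b output = output := by
  induction n with
  | zero => intro a b output _; rfl
  | succ n ih =>
    intro a b output h
    have hne : a ≠ PySem.Int.floordiv b 32 := by omega
    simp only [countLoopA, if_neg hne]
    exact ih (a + 1) b output (by omega)

-- Main invariant for stride ≥ 32: starting at (a, b, output) with the target ahead,
-- the loop adds ⌊(32(a+n) - 1 - b)/stride⌋ + 1 matches (or none if negative).
theorem countLoopA_closed (stride : Int) (hs : 32 ≤ stride) (n : Nat) :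
    ∀ (a b output : Int), a ≤ PySem.Int.floordiv b 32 →
      countLoopA stride n a b output =
        output + (if 0 ≤ 32 * (a + (n : Int)) - 1 - b
                  then PySem.Int.floordiv (32 * (a + (n : Int)) - 1 - b) stride + 1
                  else 0) := by
  have hfd : ∀ t : Int, PySem.Int.floordiv t 32 = t / 32 :=
    fun t => PySem.Int.floordiv_eq_ediv_of_pos (by omega)
  have hfds : ∀ t : Int, PySem.Int.floordiv t stride = t / stride :=
    fun t => PySem.Int.floordiv_eq_ediv_of_pos (by omega)
  induction n with
  | zero =>
    intro a b output h
    rw [hfd] at h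
    have hneg : ¬ (0 ≤ 32 * (a + ((0 : Nat) : Int)) - 1 - b) := by push_cast; omega
    rw [if_neg hneg]
    simp [countLoopA]
  | succ n ih =>
    intro a b output h
    by_cases hm : a = PySem.Int.floordiv b 32
    · simp only [countLoopA, if_pos hm]
      rw [hfd] at hm
      have hpre : a + 1 ≤ PySem.Int.floordiv (b + stride) 32 := by
        rw [hfd]; omega
      rw [ih (a + 1) (b + stride) (output + 1) hpre]
      have hC : 0 ≤ 32 * (a + ((n + 1 : Nat) : Int)) - 1 - b := by push_cast; omega
      set C : Int := 32 * (a + ((n + 1 : Nat) : Int)) - 1 - b with hCdef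
      have harg : 32 * (a + 1 + ((n : Nat) : Int)) - 1 - (b + stride) = C - stride := by
        push_cast [hCdef]; ring
      rw [harg]
      rw [if_pos hC]
      by_cases hcs : 0 ≤ C - stride
      · rw [if_pos hcs, hfds, hfds]
        have : C - stride + 1 * stride = C := by ring
        have hdiv : (C - stride + 1 * stride) / stride = (C - stride) / stride + 1 :=
          Int.add_mul_ediv_right _ 1 (by omega)
        rw [this] at hdiv
        omega
      · rw [if_neg hcs, hfds]
        have : C / stride = 0 := Int.ediv_eq_zero_of_lt hC (by omega)
        omega
    · simp only [countLoopA, if_neg hm]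
      have hpre : a + 1 ≤ PySem.Int.floordiv b 32 := by
        rw [hfd] at h hm ⊢; omega
      rw [ih (a + 1) b output hpre]
      have : a + 1 + ((n : Nat) : Int) = a + ((n + 1 : Nat) : Int) := by push_cast; ring
      rw [this]

theorem floordiv64 : PySem.Int.floordiv 64 32 = 2 := by decide

-- ===== VERDICT (by name: the statement is the Claim_ definition above) =====
theorem count_equal_a_b_spec : Claim_equal_count_equal_a_b := by
  intro x stride _
  unfold Spec_count_equal_a_b count_equal_a_b count_equal_a_b_alt
  by_cases hx : x ≤ 0
  · -- at most two iterations, a never reaches the target 2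
    rw [if_pos hx]
    rcases Nat.lt_or_ge (x + 2).toNat 3 with h3 | h3
    · interval_cases h : (x + 2).toNat <;>
        simp [countLoopA]
    · omega
  · rw [if_neg hx]
    have hx1 : 1 ≤ x := by omega
    have hn3 : (x + 2).toNat = (x - 1).toNat + 3 := by omega
    by_cases hs : stride < 32
    · -- ramp a = 0,1, match at a = 2, then stall forever
      rw [if_pos hs, hn3]
      have h0 : (0 : Int) ≠ PySem.Int.floordiv 64 32 := by rw [floordiv64]; decide
      have h1 : (1 : Int) ≠ PySem.Int.floordiv 64 32 := by rw [floordiv64]; decide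
      simp only [countLoopA, if_neg h0]
      apply countLoopA_stall
      have : PySem.Int.floordiv (64 + stride) 32 = (64 + stride) / 32 :=
        PySem.Int.floordiv_eq_ediv_of_pos (by omega)
      rw [this]
      omega
    · rw [if_neg (by omega : ¬ stride < 32)]
      have h0 : (0 : Int) ≤ PySem.Int.floordiv 64 32 := by rw [floordiv64]; decide
      rw [countLoopA_closed stride (by omega) _ 0 64 0 h0]
      have hcast : ((x + 2).toNat : Int) = x + 2 := by omega
      rw [hcast]
      have harg : 32 * (0 + (x + 2)) - 1 - 64 = 32 * x - 1 := by ring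
      rw [harg, if_pos (by omega : (0:Int) ≤ 32 * x - 1)]
      ring
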